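-- pv_equiv track=rewrite | github.com/ahyeon-github/Baekjoon | 프로그래머스/lv2/49993. 스킬트리/스킬트리.py | solution
-- ===== SOURCE A (Python) =====
-- from collections import deque
--
-- def solution(skill, skill_trees):
--     answer = 0
--     for tree in skill_trees:
--         dq = deque(skill)
--         for x in tree:
--             if x in dq:
--                 if x !=dq.popleft():
--                     break
--         else:
--             answer +=1
--
--
--     return answer
-- ===== SOURCE B (Python) =====
-- def solution(skill, skill_trees):
--     last = {c: i for i, c in enumerate(skill)}  # last occurrence of each skill char
--     answer = 0
--     for tree in skill_trees:
--         i = 0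
--         ok = True
--         for x in tree:
--             if last.get(x, -1) >= i:   # x still waiting in skill[i:]
--                 if skill[i] == x:
--                     i += 1
--                 else:
--                     ok = False
--                     break
--         if ok:
--             answer += 1
--     return answer
-- ===== Notes on version B (the rewrite author's own statement) =====
-- stated objective: faster
-- what changed: Replaces the per-tree deque copy with its O(k) membership scan and popleft by a last-occurrence index map built once plus an advancing integer cursor per tree.
import Mathlib
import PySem

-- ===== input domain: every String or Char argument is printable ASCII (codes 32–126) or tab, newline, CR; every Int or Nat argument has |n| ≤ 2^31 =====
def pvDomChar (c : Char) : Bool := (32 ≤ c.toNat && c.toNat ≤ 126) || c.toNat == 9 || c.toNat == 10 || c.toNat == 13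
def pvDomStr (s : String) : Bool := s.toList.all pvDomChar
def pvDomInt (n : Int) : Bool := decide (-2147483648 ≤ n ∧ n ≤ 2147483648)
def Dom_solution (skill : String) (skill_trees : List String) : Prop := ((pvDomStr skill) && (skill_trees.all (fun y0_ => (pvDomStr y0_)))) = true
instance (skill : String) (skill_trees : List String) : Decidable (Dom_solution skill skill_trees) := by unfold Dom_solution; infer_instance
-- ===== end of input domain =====

-- B replaces A's per-tree mutated deque (copy + linear membership scan + popleft) with a
-- last-occurrence index map built once plus an advancing cursor per tree; return values
-- are proved equal on every input.

-- ===== PORT A =====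
-- inner 'for x in tree' loop of A over the deque dq; returns true iff the loop ends without break
def pvLoopA : List Char → List Char → Bool
  | [], _ => true
  | x :: rest, dq =>
    if dq.contains x then
      match dq with
      | [] => true            -- unreachable: contains on the empty deque is false
      | h :: t => if x == h then pvLoopA rest t else false
    else pvLoopA rest dq

def solution (skill : String) (skill_trees : List String) : Int :=
  skill_trees.foldl (fun answer tree =>
    if pvLoopA tree.toList skill.toList then answer + 1 else answer) 0

-- ===== PORT B =====
-- last = {c: i for i, c in enumerate(skill)}  (later inserts overwrite: last occurrence wins)
def pvLast (s : List Char) : PySem.Dict Char Int :=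
  (PySem.List.enumerate s).foldl (fun d p => d.insert p.2 p.1) PySem.Dict.empty

-- inner loop of B with the cursor i over the tree's characters
def pvLoopB (last : PySem.Dict Char Int) (sc : List Char) : List Char → Int → Bool
  | [], _ => true
  | x :: rest, i =>
    if last.getD x (-1) ≥ i then
      match PySem.List.pyGet? sc i with
      | none => true          -- unreachable: the last-occurrence guard keeps i in range
      | some ch => if ch == x then pvLoopB last sc rest (i + 1) else false
    else pvLoopB last sc rest i

def solution_alt (skill : String) (skill_trees : List String) : Int :=
  let sc := skill.toList
  let last := pvLast sc
  skill_trees.foldl (fun answer tree =>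
    if pvLoopB last sc tree.toList 0 then answer + 1 else answer) 0

-- ===== PRECONDITION & SPEC =====
def Spec_solution (skill : String) (skill_trees : List String) (out : Int) : Prop := out = solution_alt skill skill_trees
instance (skill : String) (skill_trees : List String) (out : Int) : Decidable (Spec_solution skill skill_trees out) := by unfold Spec_solution; infer_instance

-- ===== CLAIM (what is proved, stated in full; the proofs are below) =====
def Claim_equal_solution : Prop := ∀ (skill : String) (skill_trees : List String), Dom_solution skill skill_trees → Spec_solution skill skill_trees (solution skill skill_trees)

-- ===== LEMMAS AND PROOFS =====

-- index of the last occurrence of x in s (meaningful only when x ∈ s)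
def pvLastIdx : List Char → Char → Nat
  | [], _ => 0
  | _ :: cs, x => if x ∈ cs then pvLastIdx cs x + 1 else 0

-- the dict built by the enumerate/insert fold looks up the last occurrence index
lemma pvLast_get_aux (x : Char) : ∀ (s : List Char) (k : Int) (d : PySem.Dict Char Int),
    ((PySem.List.enumerate s k).foldl (fun d p => d.insert p.2 p.1) d).get? x =
      if x ∈ s then some (k + (pvLastIdx s x : Int)) else d.get? x := by
  intro s
  induction s with
  | nil => intro k d; simp [PySem.List.enumerate_nil]
  | cons c cs ih =>
    intro k d
    rw [PySem.List.enumerate_cons]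
    simp only [List.foldl_cons]
    rw [ih (k + 1)]
    by_cases hcs : x ∈ cs
    · simp only [hcs, if_true, List.mem_cons, or_true, pvLastIdx]
      congr 1
      push_cast
      ring
    · simp only [hcs, if_false]
      by_cases hxc : x = c
      · subst hxc
        simp [PySem.Dict.get?_insert_self, pvLastIdx, hcs]
      · have hx' : x ∉ c :: cs := by simp [hxc, hcs]
        simp [hx', PySem.Dict.get?_insert_of_ne _ _ hxc]

lemma pvLast_getD (s : List Char) (x : Char) :
    (pvLast s).getD x (-1) = if x ∈ s then ((pvLastIdx s x : Nat) : Int) else -1 := by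
  unfold pvLast
  rw [PySem.Dict.getD_eq_get?_getD, pvLast_get_aux x s 0 PySem.Dict.empty]
  split <;> simp

-- membership in the not-yet-consumed suffix is the last-occurrence test
lemma mem_drop_iff_lastIdx (x : Char) : ∀ (s : List Char) (n : Nat),
    x ∈ s.drop n ↔ x ∈ s ∧ n ≤ pvLastIdx s x := by
  intro s
  induction s with
  | nil => intro n; simp
  | cons c cs ih =>
    intro n
    cases n with
    | zero =>
      simp
    | succ m =>
      rw [List.drop_succ_cons, ih m]
      by_cases hcs : x ∈ cs
      · simp only [pvLastIdx, hcs, if_true, List.mem_cons, or_true, true_and]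
        omega
      · simp only [pvLastIdx, hcs, if_false]
        constructor
        · rintro ⟨h1, _⟩
          exact h1.elim
        · rintro ⟨_, h2⟩
          omega

-- the two inner loops agree: A on the remaining deque sc.drop n, B on the cursor n
lemma loop_eq (sc : List Char) : ∀ (tree : List Char) (n : Nat),
    pvLoopA tree (sc.drop n) = pvLoopB (pvLast sc) sc tree (n : Int) := by
  intro tree
  induction tree with
  | nil => intro n; simp [pvLoopA, pvLoopB]
  | cons x rest ih =>
    intro n
    simp only [pvLoopA, pvLoopB]
    rw [pvLast_getD]
    by_cases hmem : x ∈ sc.drop n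
    · -- x still waiting: both look at position n
      obtain ⟨hx, hle⟩ := (mem_drop_iff_lastIdx x sc n).mp hmem
      have hcont : (sc.drop n).contains x = true := by simp [hmem]
      have hguard : (if x ∈ sc then ((pvLastIdx sc x : Nat) : Int) else -1) ≥ (n : Int) := by
        simp only [hx, if_true]
        exact_mod_cast hle
      rw [hcont, if_pos hguard]
      have hn : n < sc.length := by
        by_contra hge
        rw [List.drop_eq_nil_of_le (by omega)] at hmem
        exact absurd hmem (List.not_mem_nil)
      have hdrop : sc.drop n = sc[n] :: sc.drop (n + 1) := List.drop_eq_getElem_cons hn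
      have hget : PySem.List.pyGet? sc (n : Int) = some sc[n] := by
        rw [PySem.List.pyGet?_natCast]
        exact List.getElem?_eq_getElem hn
      rw [hdrop, hget]
      simp only [if_true]
      by_cases hxe : x = sc[n]
      · have h1 : (x == sc[n]) = true := by simp [hxe]
        have h2 : (sc[n] == x) = true := by simp [hxe]
        rw [h1, h2]
        simp only [if_true]
        have := ih (n + 1)
        push_cast at this ⊢
        exact this
      · have h1 : (x == sc[n]) = false := by simp [hxe]
        have h2 : (sc[n] == x) = false := by simp [Ne.symm hxe]
        rw [h1, h2]
        simp
    · -- x already consumed or not a skill: both ignore it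
      have hcont : (sc.drop n).contains x = false := by simp [hmem]
      have hguard : ¬ ((if x ∈ sc then ((pvLastIdx sc x : Nat) : Int) else -1) ≥ (n : Int)) := by
        by_cases hx : x ∈ sc
        · simp only [hx, if_true]
          have : ¬ (n ≤ pvLastIdx sc x) := fun h =>
            hmem ((mem_drop_iff_lastIdx x sc n).mpr ⟨hx, h⟩)
          intro hc
          exact this (by exact_mod_cast hc)
        · simp only [hx, if_false]
          omega
      rw [hcont, if_neg hguard]
      simp only [Bool.false_eq_true, if_false]
      exact ih n

-- the per-tree counting folds agree, for any accumulator
lemma count_eq (s : String) : ∀ (ts : List String) (acc : Int),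
    ts.foldl (fun a t => if pvLoopA t.toList s.toList then a + 1 else a) acc
      = ts.foldl (fun a t => if pvLoopB (pvLast s.toList) s.toList t.toList 0 then a + 1 else a) acc := by
  intro ts
  induction ts with
  | nil => intro acc; rfl
  | cons t ts ih =>
    intro acc
    simp only [List.foldl_cons]
    have ht : pvLoopA t.toList s.toList = pvLoopB (pvLast s.toList) s.toList t.toList 0 := by
      have := loop_eq s.toList t.toList 0
      simpa using this
    rw [ht]
    exact ih _

-- ===== VERDICT (by name: the statement is the Claim_ definition above) =====
theorem solution_spec : Claim_equal_solution := by
  intro skill skill_trees _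
  unfold Spec_solution solution solution_alt
  exact count_eq skill skill_trees 0
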